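-- pv_equiv track=rewrite | github.com/2811907609/lixiang_code_clone | codebuddy/ai_agents/ai_agents/supervisor_agents/detected_static_repair/file_reader.py | _find_matching_rule_key
-- ===== SOURCE A (Python) =====
-- from typing import Optional,Dict, Any
--
-- def _find_matching_rule_key(rule_number: str, rule_keys: list) -> Optional[str]:
--     """
--     Find the best matching rule key from available keys.
--
--     Args:
--         rule_number (str): Rule number like "20.10"
--         rule_keys (list): List of available rule keys like ["rule_20_10", "rule_1_1", ...]
--
--     Returns:
--         Optional[str]: Best matching key or None if not found
--     """
--     # Convert rule number to expected key format
--     normalized_number = rule_number.replace('.', '_')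
--     expected_key = f"rule_{normalized_number}"
--
--     # Direct match first
--     if expected_key in rule_keys:
--         return expected_key
--
--     # Fuzzy matching - find keys that contain the rule number
--     candidates = []
--     for key in rule_keys:
--         if normalized_number in key:
--             candidates.append(key)
--
--     # If only one candidate, return it
--     if len(candidates) == 1:
--         return candidates[0]
--
--     # If multiple candidates, prefer exact format match
--     for candidate in candidates:
--         if candidate == expected_key:
--             return candidate
--
--     # Return first candidate if any
--     if candidates:
--         return candidates[0]
--
--     return None
-- ===== SOURCE B (Python) =====
-- def _find_matching_rule_key(rule_number: str, rule_keys: list):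
--     normalized_number = rule_number.replace('.', '_')
--     expected_key = f"rule_{normalized_number}"
--     first_candidate = None
--     for key in rule_keys:
--         if key == expected_key:
--             return expected_key
--         if first_candidate is None and normalized_number in key:
--             first_candidate = key
--     return first_candidate
-- ===== Notes on version B (the rewrite author's own statement) =====
-- stated objective: simpler
-- what changed: Single left-to-right pass keeping one running first_candidate (exact key wins immediately), replacing A's separate membership pass, candidate-list construction and two post-loop scans.
import Mathlib
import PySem

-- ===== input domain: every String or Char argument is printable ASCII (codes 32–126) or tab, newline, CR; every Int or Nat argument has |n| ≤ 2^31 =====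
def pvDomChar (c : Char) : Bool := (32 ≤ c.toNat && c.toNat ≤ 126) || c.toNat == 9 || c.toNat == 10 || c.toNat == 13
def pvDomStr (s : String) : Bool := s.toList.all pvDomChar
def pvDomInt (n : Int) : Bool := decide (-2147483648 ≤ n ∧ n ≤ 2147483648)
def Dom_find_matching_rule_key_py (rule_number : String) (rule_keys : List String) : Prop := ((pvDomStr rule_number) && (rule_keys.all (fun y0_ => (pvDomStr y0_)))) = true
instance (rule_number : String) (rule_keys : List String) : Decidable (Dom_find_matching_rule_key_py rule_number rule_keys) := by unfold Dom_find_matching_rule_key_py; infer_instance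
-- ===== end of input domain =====

-- B fuses A's membership pass, candidate-list construction and two post-loop scans into
-- one left-to-right pass keeping a single running first_candidate (objective: simpler).

-- ===== PORT A =====
def find_matching_rule_key_py (rule_number : String) (rule_keys : List String) : Option String :=
  let normalized_number := PySem.Str.replace rule_number "." "_"
  let expected_key := PySem.Str.join "" ["rule_", normalized_number]
  -- Direct match first
  if rule_keys.contains expected_key then some expected_key
  else
    -- Fuzzy matching - collect the keys that contain the rule number
    let candidates := rule_keys.foldl
      (fun acc key => if PySem.Str.isIn normalized_number key then acc ++ [key] else acc) []
    -- If only one candidate, return it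
    if candidates.length = 1 then candidates.head?
    else
      -- If multiple candidates, prefer exact format match
      match candidates.find? (fun c => c == expected_key) with
      | some c => some c
      | none =>
        -- Return first candidate if any, else None
        candidates.head?

-- ===== PORT B =====
def find_matching_rule_key_py_altLoop (normalized_number expected_key : String)
    (keys : List String) (first_candidate : Option String) : Option String :=
  match keys with
  | [] => first_candidate
  | key :: rest =>
    if key == expected_key then some expected_key
    else
      find_matching_rule_key_py_altLoop normalized_number expected_key rest
        (if first_candidate.isNone && PySem.Str.isIn normalized_number key then some key
         else first_candidate)

def find_matching_rule_key_py_alt (rule_number : String) (rule_keys : List String) : Option String :=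
  let normalized_number := PySem.Str.replace rule_number "." "_"
  let expected_key := PySem.Str.join "" ["rule_", normalized_number]
  find_matching_rule_key_py_altLoop normalized_number expected_key rule_keys none

-- ===== PRECONDITION & SPEC =====
def Spec_find_matching_rule_key_py (rule_number : String) (rule_keys : List String) (out : Option String) : Prop := out = find_matching_rule_key_py_alt rule_number rule_keys
instance (rule_number : String) (rule_keys : List String) (out : Option String) : Decidable (Spec_find_matching_rule_key_py rule_number rule_keys out) := by unfold Spec_find_matching_rule_key_py; infer_instance

-- ===== CLAIM (what is proved, stated in full; the proofs are below) =====
def Claim_equal_find_matching_rule_key_py : Prop := ∀ (rule_number : String) (rule_keys : List String), Dom_find_matching_rule_key_py rule_number rule_keys → Spec_find_matching_rule_key_py rule_number rule_keys (find_matching_rule_key_py rule_number rule_keys)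

-- ===== LEMMAS AND PROOFS =====

-- B's loop, characterised: the exact key wins if present, otherwise the accumulator
-- or-else the first key containing the normalized number.
theorem altLoop_eq (n e : String) (keys : List String) (first : Option String) :
    find_matching_rule_key_py_altLoop n e keys first =
      if keys.contains e then some e
      else first.or (keys.find? (fun k => PySem.Str.isIn n k)) := by
  induction keys generalizing first with
  | nil => simp [find_matching_rule_key_py_altLoop]
  | cons k rest ih =>
    simp only [find_matching_rule_key_py_altLoop, ih, List.contains_cons, List.find?_cons]
    by_cases hk : k = e
    · subst hk; simp
    · have hbe : (k == e) = false := by simp [hk]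
      have hek : ¬ e = k := fun h => hk h.symm
      simp only [hbe, Bool.false_eq_true, if_false]
      by_cases hm : e ∈ rest
      · simp [hm]
      · cases first <;>
          cases h : PySem.Chars.isIn n.toList k.toList <;>
          simp [h, hm, hek]

-- A's else-branch, characterised: once the direct membership test has failed, the
-- exact-format scan over the candidates finds nothing (every candidate is a member of
-- keys), so every remaining branch returns the first candidate.
theorem portA_core (n e : String) (keys : List String) :
    (if keys.contains e then some e
     else
       let candidates := keys.foldl
         (fun acc key => if PySem.Str.isIn n key then acc ++ [key] else acc) []
       if candidates.length = 1 then candidates.head?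
       else
         match candidates.find? (fun c => c == e) with
         | some c => some c
         | none => candidates.head?) =
      if keys.contains e then some e
      else keys.find? (fun k => PySem.Str.isIn n k) := by
  by_cases hmem : keys.contains e
  · rw [if_pos hmem, if_pos hmem]
  · rw [if_neg hmem, if_neg hmem]
    have hcand : keys.foldl
        (fun acc key => if PySem.Str.isIn n key then acc ++ [key] else acc) [] =
        keys.filter (fun k => PySem.Str.isIn n k) := by
      have := PySem.List.foldl_append_if (fun k => PySem.Str.isIn n k) id keys []
      simpa using this
    simp only [hcand]
    have hfind : (keys.filter (fun k => PySem.Str.isIn n k)).find? (fun c => c == e) = none := by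
      rw [List.find?_eq_none]
      intro x hx hxe
      have hx' : x ∈ keys := (List.mem_filter.mp hx).1
      have : keys.contains e := by
        rw [List.contains_iff_mem]
        simpa [eq_of_beq hxe] using hx'
      exact hmem this
    split
    · exact List.head?_filter
    · rw [hfind, List.head?_filter]

-- ===== VERDICT (by name: the statement is the Claim_ definition above) =====
theorem find_matching_rule_key_py_spec : Claim_equal_find_matching_rule_key_py := by
  intro rule_number rule_keys _
  show find_matching_rule_key_py rule_number rule_keys = _
  rw [find_matching_rule_key_py, find_matching_rule_key_py_alt, altLoop_eq]
  simpa using portA_core (PySem.Str.replace rule_number "." "_")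
    (PySem.Str.join "" ["rule_", PySem.Str.replace rule_number "." "_"]) rule_keys
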